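-- pv_equiv track=rewrite | github.com/PatrykSzczepkowski/SI-2023-Patryk-Szczepkowski | lab6.py | find_rules_without_removing
-- ===== SOURCE A (Python) =====
-- import itertools
--
-- def check_consistency(rule, examples):
--     consistent_examples = []
--     for example in examples:
--         if all(example[feature] == value for feature, value in rule):
--             consistent_examples.append(example)
--     return consistent_examples
--
-- def find_rules_without_removing(examples, max_rule_length):
--     num_features = len(examples[0]) - 1
--     rules = []
--
--     for rule_length in range(1, max_rule_length + 1):
--         best_rule = None
--         best_covered_examples = []
--
--         for rule in itertools.combinations(enumerate(range(num_features)), rule_length):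
--             covered_examples = check_consistency(rule, examples)
--             if len(covered_examples) > len(best_covered_examples):
--                 best_rule = rule
--                 best_covered_examples = covered_examples
--
--         if best_rule:
--             rules.append(best_rule)
--
--     return rules
-- ===== SOURCE B (Python) =====
-- import itertools
--
-- def find_rules_without_removing(examples, max_rule_length):
--     num_features = len(examples[0]) - 1
--     conditions = list(enumerate(range(num_features)))
--     # coverage index: for each atomic condition (feature, value), the set of
--     # indices of examples satisfying it
--     coverage = {(feature, value): {i for i, ex in enumerate(examples) if ex[feature] == value}
--                 for feature, value in conditions}
--     all_indices = set(range(len(examples)))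
--
--     rules = []
--     for rule_length in range(1, max_rule_length + 1):
--         best_rule, best_count = None, 0
--         for rule in itertools.combinations(conditions, rule_length):
--             covered = all_indices
--             for cond in rule:
--                 covered = covered & coverage[cond]
--             if len(covered) > best_count:
--                 best_rule, best_count = rule, len(covered)
--         if best_rule:
--             rules.append(best_rule)
--     return rules
-- ===== Notes on version B (the rewrite author's own statement) =====
-- stated objective: alternative
-- what changed: B precomputes, once, a coverage index mapping each atomic condition to the set of example indices satisfying it, then scores every feature-combination by set intersection instead of re-scanning all examples per combination; Pre_ excludes empty examples (A raises IndexError on examples[0]) and ragged inputs with a row shorter than num_features, on which B's upfront index build raises while A raises only when max_rule_length >= 1 and returns [] otherwise.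
-- outside the precondition, e.g. on find_rules_without_removing([[1, 2, 3], [4]], 0): A returns [], B raises IndexError
import Mathlib
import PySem

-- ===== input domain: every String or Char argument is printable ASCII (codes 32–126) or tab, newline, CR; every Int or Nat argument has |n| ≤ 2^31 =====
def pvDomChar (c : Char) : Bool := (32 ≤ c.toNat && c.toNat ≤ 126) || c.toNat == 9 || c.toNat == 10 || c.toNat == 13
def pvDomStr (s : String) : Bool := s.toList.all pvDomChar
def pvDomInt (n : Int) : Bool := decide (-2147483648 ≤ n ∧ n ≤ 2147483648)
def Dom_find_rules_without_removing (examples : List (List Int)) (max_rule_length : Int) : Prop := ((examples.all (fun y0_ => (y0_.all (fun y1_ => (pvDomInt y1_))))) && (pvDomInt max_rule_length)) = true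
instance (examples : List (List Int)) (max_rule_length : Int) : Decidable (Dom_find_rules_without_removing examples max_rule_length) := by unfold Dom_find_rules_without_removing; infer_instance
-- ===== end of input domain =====

-- B builds, once, a coverage index from each atomic condition to the set of example
-- indices satisfying it, and scores each combination by set intersection (same results,
-- different data structure; A rescans all examples for every combination).

-- itertools.combinations over a list, in itertools' order (used by both ports).
def pvCombos {α : Type} : List α → Nat → List (List α)
  | _, 0 => [[]]
  | [], _+1 => []
  | x :: xs, n+1 => ((pvCombos xs n).map (fun c => x :: c)) ++ pvCombos xs (n+1)

-- ===== PORT A =====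
def pvRuleHolds (rule : List (Int × Int)) (ex : List Int) : Bool :=
  rule.all (fun fv => PySem.List.pyGetD ex fv.1 0 == fv.2)

def check_consistency (rule : List (Int × Int)) (examples : List (List Int)) : List (List Int) :=
  examples.foldl (fun acc ex => if pvRuleHolds rule ex then acc ++ [ex] else acc) []

def find_rules_without_removing (examples : List (List Int)) (max_rule_length : Int) : List (List (Int × Int)) :=
  let num_features : Int := (examples.headI.length : Int) - 1
  let feat_pairs : List (Int × Int) := PySem.List.enumerate (PySem.List.pyRange 0 num_features)
  (PySem.List.pyRange 1 (max_rule_length + 1)).foldl (fun rules rule_length =>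
    let best := (pvCombos feat_pairs rule_length.toNat).foldl
      (fun (st : Option (List (Int × Int)) × List (List Int)) rule =>
        let covered := check_consistency rule examples
        if covered.length > st.2.length then (some rule, covered) else st)
      (none, [])
    match best.1 with
    | some r => rules ++ [r]
    | none => rules) []

-- ===== PORT B =====
-- the coverage-index dict of Source B: condition (feature, value) ↦ set of matching example indices
def pvCoverage (examples : List (List Int)) (conditions : List (Int × Int)) :
    PySem.Dict (Int × Int) (PySem.Set Int) :=
  conditions.foldl (fun d cond =>
    d.insert cond (PySem.Set.ofList (((PySem.List.enumerate examples).filter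
      (fun p => PySem.List.pyGetD p.2 cond.1 0 == cond.2)).map (·.1)))) PySem.Dict.empty

def find_rules_without_removing_alt (examples : List (List Int)) (max_rule_length : Int) : List (List (Int × Int)) :=
  let num_features : Int := (examples.headI.length : Int) - 1
  let conditions : List (Int × Int) := PySem.List.enumerate (PySem.List.pyRange 0 num_features)
  let coverage := pvCoverage examples conditions
  let all_indices : PySem.Set Int := PySem.Set.ofList (PySem.List.pyRange 0 (examples.length : Int))
  (PySem.List.pyRange 1 (max_rule_length + 1)).foldl (fun rules rule_length =>
    let best := (pvCombos conditions rule_length.toNat).foldl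
      (fun (st : Option (List (Int × Int)) × Nat) rule =>
        let covered := rule.foldl
          (fun s cond => PySem.Set.inter s (coverage.getD cond PySem.Set.empty)) all_indices
        let n := covered.length
        if n > st.2 then (some rule, n) else st)
      (none, 0)
    match best.1 with
    | some r => rules ++ [r]
    | none => rules) []

-- ===== PRECONDITION & SPEC =====
-- Pre_ excludes exactly the inputs where a Python side raises: empty `examples`
-- (both raise IndexError on examples[0]) and ragged inputs with a row shorter than
-- num_features, on which B's upfront coverage-index build raises IndexError while
-- A raises only when max_rule_length ≥ 1 (and returns [] otherwise).
def Pre_find_rules_without_removing (examples : List (List Int)) (max_rule_length : Int) : Prop :=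
  examples ≠ [] ∧ ∀ row ∈ examples, (examples.headI.length : Int) - 1 ≤ (row.length : Int)
instance (examples : List (List Int)) (max_rule_length : Int) : Decidable (Pre_find_rules_without_removing examples max_rule_length) := by unfold Pre_find_rules_without_removing; infer_instance

def pvWitness_find_rules_without_removing : List (List Int) × Int := ([[0, 1, 7], [0, 0, 3], [5, 1, 2]], 2)

def Spec_find_rules_without_removing (examples : List (List Int)) (max_rule_length : Int) (out : List (List (Int × Int))) : Prop := out = find_rules_without_removing_alt examples max_rule_length
instance (examples : List (List Int)) (max_rule_length : Int) (out : List (List (Int × Int))) : Decidable (Spec_find_rules_without_removing examples max_rule_length out) := by unfold Spec_find_rules_without_removing; infer_instance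

-- ===== CLAIM (what is proved, stated in full; the proofs are below) =====
def Claim_equal_find_rules_without_removing : Prop := ∀ (examples : List (List Int)) (max_rule_length : Int), Dom_find_rules_without_removing examples max_rule_length → Pre_find_rules_without_removing examples max_rule_length → Spec_find_rules_without_removing examples max_rule_length (find_rules_without_removing examples max_rule_length)

-- ===== LEMMAS AND PROOFS =====

theorem pvPyRange_nil {a b : Int} (h : b ≤ a) : PySem.List.pyRange a b = [] := by
  simp [PySem.List.pyRange]; omega

theorem pvCombos_sub {α : Type} {l : List α} {n : Nat} {c : List α} (hc : c ∈ pvCombos l n) :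
    ∀ x ∈ c, x ∈ l := by
  induction l generalizing n c with
  | nil => cases n with
    | zero => simp [pvCombos] at hc; simp [hc]
    | succ n => simp [pvCombos] at hc
  | cons y ys ih =>
    cases n with
    | zero => simp [pvCombos] at hc; simp [hc]
    | succ n =>
      simp only [pvCombos, List.mem_append, List.mem_map] at hc
      rcases hc with ⟨c', hc', rfl⟩ | hc
      · intro x hx
        rcases List.mem_cons.mp hx with rfl | hx
        · exact List.mem_cons_self
        · exact List.mem_cons_of_mem _ (ih hc' x hx)
      · exact fun x hx => List.mem_cons_of_mem _ (ih hc x hx)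

theorem pvEnum_pyRange (b : Int) : ∀ a,
    PySem.List.enumerate (PySem.List.pyRange a b) a = (PySem.List.pyRange a b).map (fun f => (f, f)) := by
  intro a
  induction hn : (b - a).toNat generalizing a with
  | zero => rw [pvPyRange_nil (by omega)]; simp [PySem.List.enumerate_nil]
  | succ n ih =>
    have h : a < b := by omega
    rw [PySem.List.pyRange_one_cons h, PySem.List.enumerate_cons, List.map_cons]
    exact congrArg _ (ih (a + 1) (by omega))

theorem pvNodupRangeInt (b : Int) : (PySem.List.pyRange 0 b).Nodup := by
  by_cases hb : b ≤ 0
  · rw [pvPyRange_nil hb]; exact List.nodup_nil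
  · rw [show b = ((b.toNat : Nat) : Int) by omega, PySem.List.pyRange_zero_natCast]
    exact (List.nodup_range).map (fun a b h => by omega)

-- the per-condition coverage set, named for the proofs
def pvCovSet (examples : List (List Int)) (cond : Int × Int) : PySem.Set Int :=
  PySem.Set.ofList (((PySem.List.enumerate examples).filter
    (fun p => PySem.List.pyGetD p.2 cond.1 0 == cond.2)).map (·.1))

theorem pvCoverage_getD (examples : List (List Int)) (conditions : List (Int × Int))
    (hnd : conditions.Nodup) (cond : Int × Int) (hm : cond ∈ conditions) :
    (pvCoverage examples conditions).getD cond PySem.Set.empty = pvCovSet examples cond := by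
  have hitems : (pvCoverage examples conditions).items
      = conditions.map (fun c => (c, pvCovSet examples c)) := by
    have h := PySem.Dict.items_foldl_insert_fresh (l := conditions) (k := fun a => a)
      (v := fun c => pvCovSet examples c) (d := PySem.Dict.empty)
      (fun a _ => PySem.Dict.contains_empty a) (by simpa using hnd)
    simpa [pvCoverage, pvCovSet] using h
  have hkeys : (pvCoverage examples conditions).keys.Nodup := by
    have hk : (pvCoverage examples conditions).keys = conditions := by
      simp [PySem.Dict.keys, hitems, Function.comp_def]
    rw [hk]; exact hnd
  exact PySem.Dict.getD_of_mem_items _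
    (by rw [hitems]; exact List.mem_map.mpr ⟨cond, hm, rfl⟩) hkeys _

theorem pvAllCongr {α : Type} (c : List α) (p r : α → Bool) (h : ∀ x ∈ c, p x = r x) :
    c.all p = c.all r := by
  induction c with
  | nil => rfl
  | cons x xs ih =>
    simp only [List.all_cons, h x List.mem_cons_self,
      ih (fun y hy => h y (List.mem_cons_of_mem _ hy))]

theorem pvFilterRange (xs : List (List Int)) (q : List Int → Bool) :
    ((List.range xs.length).filter (fun k => q (xs.getD k []))).length = (xs.filter q).length := by
  induction xs with
  | nil => simp
  | cons x xs ih =>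
    simp only [List.length_cons, List.range_succ_eq_map]
    rw [List.filter_cons, List.filter_map]
    have htail : List.filter ((fun k => q ((x :: xs).getD k [])) ∘ Nat.succ) (List.range xs.length)
        = List.filter (fun k => q (xs.getD k [])) (List.range xs.length) := by
      apply List.filter_congr; intro k _; simp [Function.comp]
    rw [List.filter_cons]
    by_cases hx : q x
    · simp only [List.getD_cons_zero, hx, if_pos]
      simp only [List.length_cons, List.length_map, htail]
      omega
    · simp only [List.getD_cons_zero, hx, Bool.false_eq_true, if_neg, not_false_iff]
      simp only [List.length_map, htail]
      omega

theorem pvInterFold (c : List (Int × Int)) (m : Int × Int → PySem.Set Int) (s : List Int) :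
    c.foldl (fun s cond => PySem.Set.inter s (m cond)) s
      = s.filter (fun i => c.all (fun cond => (m cond).contains i)) := by
  induction c generalizing s with
  | nil => simp
  | cons f c ih =>
    simp only [List.foldl_cons, ih]
    rw [show PySem.Set.inter s (m f) = s.filter (fun i => (m f).contains i) from rfl,
        List.filter_filter]
    apply List.filter_congr; intro i _
    simp only [List.all_cons]
    exact Bool.and_comm _ _

theorem pvEntryContains (examples : List (List Int)) (cond : Int × Int) (j : Nat)
    (hj : j < examples.length) :
    (pvCovSet examples cond).contains ((j : Int))
      = (PySem.List.pyGetD (examples.getD j []) cond.1 0 == cond.2) := by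
  apply Bool.eq_iff_iff.mpr
  rw [PySem.Set.contains_iff]
  constructor
  · intro hmem
    rw [pvCovSet, PySem.Set.mem_ofList] at hmem
    rcases List.mem_map.mp hmem with ⟨p, hp, hp1⟩
    rcases List.mem_filter.mp hp with ⟨hpe, hg⟩
    rcases (PySem.List.mem_enumerate_iff examples 0 p).mp hpe with ⟨k, hk, rfl⟩
    simp only at hp1
    have hkj : k = j := by omega
    subst hkj
    rw [List.getD_eq_getElem examples [] hj]
    exact hg
  · intro hval
    rw [pvCovSet, PySem.Set.mem_ofList]
    apply List.mem_map.mpr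
    refine ⟨((j : Int), examples[j]), List.mem_filter.mpr ⟨?_, ?_⟩, rfl⟩
    · exact (PySem.List.mem_enumerate_iff examples 0 _).mpr ⟨j, hj, by simp⟩
    · rw [List.getD_eq_getElem examples [] hj] at hval
      exact hval

theorem pvCountEq (examples : List (List Int)) (conditions : List (Int × Int))
    (hnd : conditions.Nodup) (c : List (Int × Int))
    (hc : ∀ cond ∈ c, cond ∈ conditions) :
    (check_consistency c examples).length
      = (c.foldl (fun s cond => PySem.Set.inter s
            ((pvCoverage examples conditions).getD cond PySem.Set.empty))
          (PySem.Set.ofList (PySem.List.pyRange 0 (examples.length : Int)))).length := by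
  have hA : check_consistency c examples = examples.filter (pvRuleHolds c) := by
    simpa using PySem.List.foldl_append_if (pvRuleHolds c) id examples []
  have hfold : c.foldl (fun s cond => PySem.Set.inter s
        ((pvCoverage examples conditions).getD cond PySem.Set.empty))
        (PySem.Set.ofList (PySem.List.pyRange 0 (examples.length : Int)))
      = c.foldl (fun s cond => PySem.Set.inter s (pvCovSet examples cond))
        (PySem.Set.ofList (PySem.List.pyRange 0 (examples.length : Int))) := by
    apply PySem.List.foldl_congr_mem
    intro s cond hcm
    rw [pvCoverage_getD examples conditions hnd cond (hc cond hcm)]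
  rw [hA, hfold, pvInterFold,
      PySem.Set.ofList_eq_self_of_nodup _ (pvNodupRangeInt (examples.length : Int)),
      show ((examples.length : Int)) = ((examples.length : Nat) : Int) from rfl,
      PySem.List.pyRange_zero_natCast, List.filter_map, List.length_map]
  have hR : List.filter ((fun i => c.all (fun cond => (pvCovSet examples cond).contains i)) ∘ (fun k : Nat => (k : Int)))
        (List.range examples.length)
      = List.filter (fun k => pvRuleHolds c (examples.getD k [])) (List.range examples.length) := by
    apply List.filter_congr
    intro k hk
    simp only [Function.comp]
    exact pvAllCongr c _ _ (fun cond _ => pvEntryContains examples cond k (List.mem_range.mp hk))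
  rw [hR, pvFilterRange examples (pvRuleHolds c)]

theorem pvInnerFold (examples : List (List Int)) (conditions : List (Int × Int))
    (hnd : conditions.Nodup) :
    ∀ (combos : List (List (Int × Int))),
      (∀ c ∈ combos, ∀ cond ∈ c, cond ∈ conditions) →
      ∀ (sA : Option (List (Int × Int)) × List (List Int)) (sB : Option (List (Int × Int)) × Nat),
      sA.1 = sB.1 → sA.2.length = sB.2 →
      (((combos.foldl (fun st rule =>
          if (check_consistency rule examples).length > st.2.length
          then (some rule, check_consistency rule examples)
          else st) sA).1
        = (combos.foldl (fun st rule =>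
            if (rule.foldl (fun s cond => PySem.Set.inter s
                  ((pvCoverage examples conditions).getD cond PySem.Set.empty))
                (PySem.Set.ofList (PySem.List.pyRange 0 (examples.length : Int)))).length > st.2
            then (some rule, (rule.foldl (fun s cond => PySem.Set.inter s
                  ((pvCoverage examples conditions).getD cond PySem.Set.empty))
                (PySem.Set.ofList (PySem.List.pyRange 0 (examples.length : Int)))).length)
            else st) sB).1)) := by
  intro combos
  induction combos with
  | nil => intro _ sA sB h1 _; exact h1
  | cons c combos ih =>
    intro hc sA sB h1 h2
    simp only [List.foldl_cons]
    have hcnt := pvCountEq examples conditions hnd c (hc c List.mem_cons_self)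
    by_cases hcond : (c.foldl (fun s cond => PySem.Set.inter s
        ((pvCoverage examples conditions).getD cond PySem.Set.empty))
        (PySem.Set.ofList (PySem.List.pyRange 0 (examples.length : Int)))).length > sB.2
    · rw [if_pos (by omega), if_pos hcond]
      exact ih (fun c' hc' => hc c' (List.mem_cons_of_mem _ hc')) _ _ rfl hcnt
    · rw [if_neg (by omega), if_neg hcond]
      exact ih (fun c' hc' => hc c' (List.mem_cons_of_mem _ hc')) _ _ h1 h2

-- ===== VERDICT (by name: the statement is the Claim_ definition above) =====
theorem find_rules_without_removing_spec : Claim_equal_find_rules_without_removing := by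
  intro examples m hdom hpre
  unfold Spec_find_rules_without_removing
  simp only [find_rules_without_removing, find_rules_without_removing_alt]
  have hnd : (PySem.List.enumerate (PySem.List.pyRange 0 ((examples.headI.length : Int) - 1))).Nodup := by
    rw [pvEnum_pyRange]
    exact (pvNodupRangeInt _).map (fun a b h => by
      exact congrArg Prod.fst h)
  congr 2
  funext rules rl
  have h1 := pvInnerFold examples
    (PySem.List.enumerate (PySem.List.pyRange 0 ((examples.headI.length : Int) - 1))) hnd
    (pvCombos (PySem.List.enumerate (PySem.List.pyRange 0 ((examples.headI.length : Int) - 1))) rl.toNat)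
    (fun c hc => pvCombos_sub hc) (none, []) (none, 0) rfl rfl
  rw [h1]
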